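-- pv_equiv track=rewrite | github.com/roman91DE/simpleShell | src/simpleshell/tokenizer.py | _merge_operators
-- ===== SOURCE A (Python) =====
-- def _merge_operators(tokens: list[str]) -> list[str]:
--     """Merge consecutive '>' into '>>', '&' '&' into '&&', '|' '|' into '||'."""
--     merged: list[str] = []
--     i = 0
--     while i < len(tokens):
--         if i + 1 < len(tokens) and tokens[i] == tokens[i + 1] and tokens[i] in (">", "&", "|"):
--             merged.append(tokens[i] * 2)
--             i += 2
--         else:
--             merged.append(tokens[i])
--             i += 1
--     return merged
-- ===== SOURCE B (Python) =====
-- def _runs(tokens):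
--     """Run-length encode: list of (value, count) for maximal runs of equal tokens."""
--     if not tokens:
--         return []
--     out = []
--     cur, count = tokens[0], 1
--     for t in tokens[1:]:
--         if t == cur:
--             count += 1
--         else:
--             out.append((cur, count))
--             cur, count = t, 1
--     out.append((cur, count))
--     return out
--
--
-- def _merge_operators(tokens: list[str]) -> list[str]:
--     """Merge consecutive '>' into '>>', '&' '&' into '&&', '|' '|' into '||'."""
--     merged: list[str] = []
--     for value, count in _runs(tokens):
--         if value in (">", "&", "|"):
--             merged += [value * 2] * (count // 2) + [value] * (count % 2)
--         else:
--             merged += [value] * count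
--     return merged
-- ===== Notes on version B (the rewrite author's own statement) =====
-- stated objective: alternative
-- what changed: Replaced the explicit i/i+2 pairwise index stepping with a run-length encoding pass followed by per-run emission (count//2 doubled operators plus count%2 leftover), deciding pairing by arithmetic on run lengths instead of index jumps.
import Mathlib
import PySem

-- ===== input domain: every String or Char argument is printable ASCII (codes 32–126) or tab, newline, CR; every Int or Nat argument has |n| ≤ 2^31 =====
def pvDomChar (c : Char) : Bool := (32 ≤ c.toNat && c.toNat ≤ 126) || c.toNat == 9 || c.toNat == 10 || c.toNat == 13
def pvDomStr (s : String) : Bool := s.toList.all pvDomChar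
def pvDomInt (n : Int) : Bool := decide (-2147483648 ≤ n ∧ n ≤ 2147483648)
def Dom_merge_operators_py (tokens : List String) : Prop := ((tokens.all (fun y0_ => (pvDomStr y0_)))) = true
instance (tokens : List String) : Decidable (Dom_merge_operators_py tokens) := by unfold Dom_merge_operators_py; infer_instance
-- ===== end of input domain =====

-- B replaces A's i/i+2 index stepping with a run-length-encode pass then per-run arithmetic emission; alternative decomposition, same cost.


-- ===== PORT A =====
-- tokens[i] in (">", "&", "|")
def pvIsOp (s : String) : Bool := s == ">" || s == "&" || s == "|"

-- A's while loop over index i: i advances by 2 (pair branch) or 1; transcribed as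
-- structural recursion on the remaining suffix tokens[i:].
def merge_operators_py (tokens : List String) : List String :=
  match tokens with
  | [] => []
  | [a] => [a]
  | a :: b :: rest =>
      if a == b && pvIsOp a then (a ++ a) :: merge_operators_py rest
      else a :: merge_operators_py (b :: rest)

-- ===== PORT B =====
-- _runs: run-length encoding, carrying (cur, count) through the loop.
def pvRunsAux (cur : String) (count : Nat) : List String → List (String × Nat)
  | [] => [(cur, count)]
  | t :: rest =>
      if t == cur then pvRunsAux cur (count + 1) rest
      else (cur, count) :: pvRunsAux t 1 rest

def pvRuns (tokens : List String) : List (String × Nat) :=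
  match tokens with
  | [] => []
  | t :: rest => pvRunsAux t 1 rest

-- per-run emission: [value*2] * (count // 2) + [value] * (count % 2), else [value] * count
def pvEmit (p : String × Nat) : List String :=
  if pvIsOp p.1 then
    List.replicate (p.2 / 2) (p.1 ++ p.1) ++ List.replicate (p.2 % 2) p.1
  else List.replicate p.2 p.1

def merge_operators_py_alt (tokens : List String) : List String :=
  (pvRuns tokens).flatMap pvEmit

-- ===== PRECONDITION & SPEC =====
def Spec_merge_operators_py (tokens : List String) (out : List String) : Prop := out = merge_operators_py_alt tokens
instance (tokens : List String) (out : List String) : Decidable (Spec_merge_operators_py tokens out) := by unfold Spec_merge_operators_py; infer_instance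

-- ===== CLAIM (what is proved, stated in full; the proofs are below) =====
def Claim_equal_merge_operators_py : Prop := ∀ (tokens : List String), Dom_merge_operators_py tokens → Spec_merge_operators_py tokens (merge_operators_py tokens)

-- ===== LEMMAS AND PROOFS =====

-- A on a maximal run: a run of n copies of v contributes exactly pvEmit (v, n).
lemma mergeA_run (v : String) (n : Nat) (rest : List String)
    (h : ∀ b, rest.head? = some b → (b == v) = false) :
    merge_operators_py (List.replicate n v ++ rest) = pvEmit (v, n) ++ merge_operators_py rest := by
  by_cases hop : pvIsOp v = true
  · induction n using Nat.strong_induction_on with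
    | _ n ih =>
      match n with
      | 0 => simp [pvEmit, hop]
      | 1 =>
        cases rest with
        | nil => simp [merge_operators_py, pvEmit, hop]
        | cons b r =>
          have hb : (b == v) = false := h b rfl
          have hvb : (v == b) = false := by
            rw [beq_eq_false_iff_ne] at hb ⊢
            exact fun e => hb e.symm
          simp [merge_operators_py, pvEmit, hop, hvb]
      | (m + 2) =>
        have : List.replicate (m + 2) v ++ rest = v :: v :: (List.replicate m v ++ rest) := by
          simp [List.replicate_succ]
        rw [this]
        have hrec := ih m (by omega)
        have hdiv : (m + 2) / 2 = m / 2 + 1 := by omega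
        have hmod : (m + 2) % 2 = m % 2 := by omega
        simp only [merge_operators_py, beq_self_eq_true, hop, Bool.and_self, if_true]
        rw [hrec]
        simp [pvEmit, hop, hdiv, hmod, List.replicate_succ]
  · have hop' : pvIsOp v = false := by simpa using hop
    induction n with
    | zero => simp [pvEmit, hop']
    | succ m ih =>
      have : List.replicate (m + 1) v ++ rest = v :: (List.replicate m v ++ rest) := by
        simp [List.replicate_succ]
      rw [this]
      cases hm : List.replicate m v ++ rest with
      | nil => simp_all [merge_operators_py, pvEmit, List.append_eq_nil_iff]
      | cons c cs =>
        have : merge_operators_py (v :: c :: cs) = v :: merge_operators_py (c :: cs) := by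
          simp [merge_operators_py, hop']
        rw [this, ← hm, ih]
        simp [pvEmit, hop', List.replicate_succ]

-- the main invariant: processing the carried run (v, n) followed by rest
lemma mergeA_runsAux (rest : List String) : ∀ (v : String) (n : Nat),
    merge_operators_py (List.replicate n v ++ rest) = (pvRunsAux v n rest).flatMap pvEmit := by
  induction rest with
  | nil =>
    intro v n
    rw [mergeA_run v n [] (by simp)]
    simp [pvRunsAux, merge_operators_py]
  | cons a r ih =>
    intro v n
    by_cases hav : (a == v) = true
    · have : List.replicate n v ++ a :: r = List.replicate (n + 1) v ++ r := by
        have : a = v := by rwa [beq_iff_eq] at hav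
        subst this
        simp [List.replicate_succ']
      rw [this, ih v (n + 1)]
      simp [pvRunsAux, hav]
    · have hav' : (a == v) = false := by simpa using hav
      rw [mergeA_run v n (a :: r) (by intro b hb; simp at hb; subst hb; exact hav')]
      have : a :: r = List.replicate 1 a ++ r := by simp
      rw [this, ih a 1]
      simp [pvRunsAux, hav']

-- ===== VERDICT (by name: the statement is the Claim_ definition above) =====
theorem merge_operators_py_spec : Claim_equal_merge_operators_py := by
  intro tokens _
  show merge_operators_py tokens = merge_operators_py_alt tokens
  cases tokens with
  | nil => rfl
  | cons t rest =>
    have : t :: rest = List.replicate 1 t ++ rest := by simp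
    rw [this, mergeA_runsAux rest t 1]
    rfl
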